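-- pv_equiv track=rewrite | github.com/me15degrees/advent-of-code | 2024/day02.py | part_one
-- ===== SOURCE A (Python) =====
-- def part_one(numbers):
--
--     direction = None
--
--     for i in range(len(numbers) - 1):
--         diff = numbers[i + 1] - numbers[i]
--
--         if abs(diff) > 3 or diff == 0:
--             return False
--
--         if diff > 0:
--             if direction is None:
--                 direction = "increasing"
--             elif direction != "increasing":
--                 return False
--
--         elif diff < 0:
--             if direction is None:
--                 direction = "decreasing"
--             elif direction != "decreasing":
--                 return False
--
--     return True
-- ===== SOURCE B (Python) =====
-- def part_one(numbers):
--     diffs = [numbers[i + 1] - numbers[i] for i in range(len(numbers) - 1)]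
--     return all(1 <= d <= 3 for d in diffs) or all(-3 <= d <= -1 for d in diffs)
-- ===== Notes on version B (the rewrite author's own statement) =====
-- stated objective: simpler
-- what changed: Replaces the single stateful pass with a direction variable and three early returns by building the adjacent-difference list once and taking two stateless all() scans (uniformly in [1,3] or uniformly in [-3,-1]).
import Mathlib
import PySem

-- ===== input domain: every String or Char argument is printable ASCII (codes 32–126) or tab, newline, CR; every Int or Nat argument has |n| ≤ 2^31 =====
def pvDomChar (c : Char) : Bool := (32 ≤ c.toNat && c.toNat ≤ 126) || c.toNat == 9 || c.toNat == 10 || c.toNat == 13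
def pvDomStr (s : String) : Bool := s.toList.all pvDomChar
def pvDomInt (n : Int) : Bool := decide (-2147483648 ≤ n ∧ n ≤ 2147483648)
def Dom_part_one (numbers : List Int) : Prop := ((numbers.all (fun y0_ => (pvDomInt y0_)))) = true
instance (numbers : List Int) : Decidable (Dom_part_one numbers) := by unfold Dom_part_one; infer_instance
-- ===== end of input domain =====

-- B replaces A's single stateful pass (direction variable, three early returns) by a
-- diff list and two stateless all() scans; objective: simpler.

-- ===== PORT A =====
-- A's index loop over i in range(len-1) with state `direction`, transcribed as a
-- pairwise recursion carrying the previous element and the direction string.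
def part_one_loop (direction : Option String) (prev : Int) : List Int → Bool
  | [] => true
  | x :: rest =>
    let diff := x - prev
    if diff.natAbs > 3 || diff == 0 then false
    else if diff > 0 then
      match direction with
      | none => part_one_loop (some "increasing") x rest
      | some d => if d ≠ "increasing" then false else part_one_loop (some d) x rest
    else if diff < 0 then
      match direction with
      | none => part_one_loop (some "decreasing") x rest
      | some d => if d ≠ "decreasing" then false else part_one_loop (some d) x rest
    else part_one_loop direction x rest

def part_one (numbers : List Int) : Bool :=
  match numbers with
  | [] => true
  | x :: rest => part_one_loop none x rest

-- ===== PORT B =====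
-- diffs = [numbers[i+1] - numbers[i] for i in range(len(numbers)-1)]
def pv_diffs (numbers : List Int) : List Int :=
  List.zipWith (fun b a => b - a) numbers.tail numbers

def part_one_alt (numbers : List Int) : Bool :=
  let diffs := pv_diffs numbers
  (diffs.all fun d => decide (1 ≤ d ∧ d ≤ 3)) || (diffs.all fun d => decide (-3 ≤ d ∧ d ≤ -1))

-- ===== PRECONDITION & SPEC =====
def Spec_part_one (numbers : List Int) (out : Bool) : Prop := out = part_one_alt numbers
instance (numbers : List Int) (out : Bool) : Decidable (Spec_part_one numbers out) := by unfold Spec_part_one; infer_instance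

-- ===== CLAIM (what is proved, stated in full; the proofs are below) =====
def Claim_equal_part_one : Prop := ∀ (numbers : List Int), Dom_part_one numbers → Spec_part_one numbers (part_one numbers)

-- ===== LEMMAS AND PROOFS =====

def pv_allInc (xs : List Int) : Bool := xs.all fun d => decide (1 ≤ d ∧ d ≤ 3)
def pv_allDec (xs : List Int) : Bool := xs.all fun d => decide (-3 ≤ d ∧ d ≤ -1)

lemma loop_inc (rest : List Int) : ∀ prev,
    part_one_loop (some "increasing") prev rest = pv_allInc (pv_diffs (prev :: rest)) := by
  induction rest with
  | nil => intro prev; simp [part_one_loop, pv_allInc, pv_diffs]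
  | cons x t ih =>
    intro prev
    simp only [part_one_loop, pv_allInc, pv_diffs, List.tail, List.zipWith, List.all_cons] at *
    by_cases h1 : 1 ≤ x - prev ∧ x - prev ≤ 3
    · have : ¬((x - prev).natAbs > 3 || (x - prev) == 0) = true := by
        simp; omega
      simp only [this]
      rw [if_neg (by simpa using this)]
      rw [if_pos (by omega)]
      simp [ih x, pv_allInc, pv_diffs, h1]
    · by_cases h2 : (x - prev).natAbs > 3 ∨ x - prev = 0
      · rw [if_pos (by simp; omega)]
        simp; omega
      · rw [if_neg (by simp; omega)]
        rw [if_neg (by omega)]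
        rw [if_pos (by omega)]
        simp; omega

lemma loop_dec (rest : List Int) : ∀ prev,
    part_one_loop (some "decreasing") prev rest = pv_allDec (pv_diffs (prev :: rest)) := by
  induction rest with
  | nil => intro prev; simp [part_one_loop, pv_allDec, pv_diffs]
  | cons x t ih =>
    intro prev
    simp only [part_one_loop, pv_allDec, pv_diffs, List.tail, List.zipWith, List.all_cons] at *
    by_cases h1 : -3 ≤ x - prev ∧ x - prev ≤ -1
    · rw [if_neg (by simp; omega)]
      rw [if_neg (by omega)]
      rw [if_pos (by omega)]
      simp [ih x, pv_allDec, pv_diffs, h1]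
    · by_cases h2 : (x - prev).natAbs > 3 ∨ x - prev = 0
      · rw [if_pos (by simp; omega)]
        simp; omega
      · rw [if_neg (by simp; omega)]
        rw [if_pos (by omega)]
        simp; omega

lemma loop_none (rest : List Int) (prev : Int) :
    part_one_loop none prev rest
      = (pv_allInc (pv_diffs (prev :: rest)) || pv_allDec (pv_diffs (prev :: rest))) := by
  cases rest with
  | nil => simp [part_one_loop, pv_allInc, pv_allDec, pv_diffs]
  | cons x t =>
    simp only [part_one_loop, pv_allInc, pv_allDec, pv_diffs, List.tail, List.zipWith,
      List.all_cons]
    by_cases h1 : 1 ≤ x - prev ∧ x - prev ≤ 3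
    · rw [if_neg (by simp; omega)]
      rw [if_pos (by omega)]
      rw [loop_inc t x]
      simp [pv_allInc, pv_allDec, pv_diffs, h1]
      omega
    · by_cases h2 : -3 ≤ x - prev ∧ x - prev ≤ -1
      · rw [if_neg (by simp; omega)]
        rw [if_neg (by omega)]
        rw [if_pos (by omega)]
        rw [loop_dec t x]
        simp [pv_allInc, pv_allDec, pv_diffs, h2]
        omega
      · by_cases h3 : (x - prev).natAbs > 3 ∨ x - prev = 0
        · rw [if_pos (by simp; omega)]
          simp; omega
        · exfalso; omega

-- ===== VERDICT (by name: the statement is the Claim_ definition above) =====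
theorem part_one_spec : Claim_equal_part_one := by
  intro numbers _
  unfold Spec_part_one part_one part_one_alt
  cases numbers with
  | nil => simp [pv_diffs]
  | cons x rest =>
    show part_one_loop none x rest = _
    rw [loop_none rest x]
    rfl
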